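-- pv_equiv track=rewrite | github.com/HughWen/AA_SUSTech | lab1/greedy_algorithm.py | greedy_balance
-- ===== SOURCE A (Python) =====
-- def greedy_balance(machine_num, t_list, sort=False):
--     # if "sort" is true, sort the time list.
--     if sort:
--         t_list.sort(reverse=True)
-- 	# init
--     makespan = 0
--     assigns = [list() for i in range(machine_num)]
--     accumulators = [0] * machine_num
-- 	# assign job for machine
--     for i in range(len(t_list)):
--         min_index = accumulators.index(min(accumulators))
--         assigns[min_index].append(t_list[i])
--         accumulators[min_index] += t_list[i]
--
--     makespan = max(accumulators)
--     return makespan, assigns, accumulators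
-- ===== SOURCE B (Python) =====
-- def greedy_balance(machine_num, t_list, sort=False):
--     # like A, sorts t_list in place when sort is true (same observable mutation)
--     if sort:
--         t_list.sort(reverse=True)
--
--     def merge(h1, h2):
--         # skew-heap merge; nodes are (value, left, right), value = (load, machine index)
--         if h1 is None:
--             return h2
--         if h2 is None:
--             return h1
--         if h1[0] <= h2[0]:
--             return (h1[0], merge(h2, h1[2]), h1[1])
--         return merge(h2, h1)
--
--     def build(lo, hi):
--         # balanced starting heap over machines lo..hi-1, all with load 0
--         if hi <= lo:
--             return None
--         mid = (lo + 1 + hi) // 2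
--         return ((0, lo), build(lo + 1, mid), build(mid, hi))
--
--     assigns = [[] for _ in range(machine_num)]
--     loads = [0] * machine_num
--     heap = build(0, machine_num)
--     for t in t_list:
--         (load, idx), left, right = heap
--         heap = merge(merge(left, right), ((load + t, idx), None, None))
--         assigns[idx].append(t)
--         loads[idx] += t
--     return max(loads), assigns, loads
-- ===== Notes on version B (the rewrite author's own statement) =====
-- stated objective: faster
-- what changed: A rescans all machine loads with min()+list.index() for every job (O(n*m)); B keeps the machines in a hand-written skew heap keyed by (load, machine index), popping the least-loaded machine and pushing it back with the job added, O((n+m) log m).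
-- outside the precondition, e.g. on greedy_balance(0, [1, 2], False): A raises ValueError, B raises TypeError
import Mathlib
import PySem

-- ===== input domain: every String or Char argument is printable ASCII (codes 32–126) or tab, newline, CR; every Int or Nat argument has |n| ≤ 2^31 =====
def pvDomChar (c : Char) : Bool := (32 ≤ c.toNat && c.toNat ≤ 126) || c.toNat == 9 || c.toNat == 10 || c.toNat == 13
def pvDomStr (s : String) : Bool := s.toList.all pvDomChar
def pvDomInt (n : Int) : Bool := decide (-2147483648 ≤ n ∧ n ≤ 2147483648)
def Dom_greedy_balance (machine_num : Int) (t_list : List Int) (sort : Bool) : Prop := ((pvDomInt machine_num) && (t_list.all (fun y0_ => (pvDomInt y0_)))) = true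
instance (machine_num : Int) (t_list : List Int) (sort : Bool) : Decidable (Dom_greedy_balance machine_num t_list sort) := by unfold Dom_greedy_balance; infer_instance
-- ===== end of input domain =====

-- B replaces A's per-job linear scan for the least-loaded machine by a hand-written skew heap
-- keyed by (load, machine index): O(n log m) instead of O(n*m). Equivalence is about the return
-- value; both versions sort t_list in place when sort=True (the same observable mutation).

-- ===== PORT A =====
-- one step of A's job loop: pick first least-loaded machine, append the job there
def greedyStepA (st : List (List Int) × List Int) (t : Int) : List (List Int) × List Int :=
  let m := (PySem.List.min? st.2 (fun x => x)).getD 0          -- min(accumulators); raises on empty, excluded by Pre_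
  let min_index := (PySem.List.index? st.2 m).getD 0           -- accumulators.index(min)
  (st.1.set min_index (st.1.getD min_index [] ++ [t]),
   st.2.set min_index (st.2.getD min_index 0 + t))

def greedy_balance (machine_num : Int) (t_list : List Int) (sort : Bool) : Int × List (List Int) × List Int :=
  let t_list := if sort then PySem.List.sorted t_list (fun x => x) true else t_list
  let assigns : List (List Int) := (PySem.List.pyRange 0 machine_num 1).map (fun _ => [])
  let accumulators : List Int := List.replicate machine_num.toNat 0   -- [0] * machine_num
  let st := (PySem.List.pyRange 0 (PySem.List.len t_list) 1).foldl
      (fun st i => greedyStepA st (PySem.List.pyGetD t_list i 0)) (assigns, accumulators)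
  let makespan := (PySem.List.max? st.2 (fun x => x)).getD 0          -- max(accumulators); raises on empty, excluded by Pre_
  (makespan, st.1, st.2)

-- ===== PORT B =====
inductive SkewHeap where
  | nil : SkewHeap
  | node : (Int × Int) → SkewHeap → SkewHeap → SkewHeap
deriving DecidableEq, Repr

def SkewHeap.size : SkewHeap → Nat
  | .nil => 0
  | .node _ l r => 1 + l.size + r.size

-- Python tuple comparison h1[0] <= h2[0] on (load, index) pairs
def pairLe (a b : Int × Int) : Bool := decide (a.1 < b.1 ∨ (a.1 = b.1 ∧ a.2 ≤ b.2))

-- Source B's recursive merge; the fuel argument only makes the recursion structural (each recursive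
-- call strictly shrinks the total size, so size h1 + size h2 fuel is always enough
-- on every input merge computes exactly what Source B's merge computes
def SkewHeap.mergeFuel : Nat → SkewHeap → SkewHeap → SkewHeap
  | _, .nil, h2 => h2
  | _, h1, .nil => h1
  | 0, h1, _ => h1
  | fuel + 1, .node v1 l1 r1, .node v2 l2 r2 =>
    if pairLe v1 v2 then .node v1 (SkewHeap.mergeFuel fuel (.node v2 l2 r2) r1) l1
    else .node v2 (SkewHeap.mergeFuel fuel (.node v1 l1 r1) r2) l2

def SkewHeap.merge (h1 h2 : SkewHeap) : SkewHeap := SkewHeap.mergeFuel (h1.size + h2.size) h1 h2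

-- Source B's build(lo, hi): balanced starting heap over machines lo..hi-1, all with load 0;
-- the fuel argument only makes the recursion structural (the interval halves each call, so
-- machine_num.toNat fuel is always enough): it computes exactly what Source B's build computes
def buildHeap : Nat → Int → Int → SkewHeap
  | 0, _, _ => .nil
  | fuel + 1, lo, hi =>
    if hi ≤ lo then .nil
    else .node (0, lo) (buildHeap fuel (lo + 1) (PySem.Int.floordiv (lo + 1 + hi) 2))
                       (buildHeap fuel (PySem.Int.floordiv (lo + 1 + hi) 2) hi)

-- one step of B's job loop: pop the heap root, push it back with the job's time added
def greedyStepB (st : SkewHeap × List (List Int) × List Int) (t : Int) : SkewHeap × List (List Int) × List Int :=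
  match st with
  | (.nil, assigns, loads) => (.nil, assigns, loads)   -- Python raises unpacking None here; excluded by Pre_
  | (.node (load, idx) l r, assigns, loads) =>
    (SkewHeap.merge (SkewHeap.merge l r) (.node (load + t, idx) .nil .nil),
     PySem.List.pySetD assigns idx (PySem.List.pyGetD assigns idx [] ++ [t]),
     PySem.List.pySetD loads idx (PySem.List.pyGetD loads idx 0 + t))

def greedy_balance_alt (machine_num : Int) (t_list : List Int) (sort : Bool) : Int × List (List Int) × List Int :=
  let t_list := if sort then PySem.List.sorted t_list (fun x => x) true else t_list
  let assigns : List (List Int) := (PySem.List.pyRange 0 machine_num 1).map (fun _ => [])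
  let loads : List Int := List.replicate machine_num.toNat 0          -- [0] * machine_num
  let heap := buildHeap machine_num.toNat 0 machine_num
  let st := t_list.foldl greedyStepB (heap, assigns, loads)
  ((PySem.List.max? st.2.2 (fun x => x)).getD 0, st.2.1, st.2.2)     -- max(loads); raises on empty, excluded by Pre_

-- ===== PRECONDITION & SPEC =====
-- A raises ValueError (min()/max() of an empty sequence) whenever machine_num < 1; B raises there too.
def Pre_greedy_balance (machine_num : Int) (t_list : List Int) (sort : Bool) : Prop := 1 ≤ machine_num
instance (machine_num : Int) (t_list : List Int) (sort : Bool) : Decidable (Pre_greedy_balance machine_num t_list sort) := by unfold Pre_greedy_balance; infer_instance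
def pvWitness_greedy_balance : Int × List Int × Bool := (3, [5, 1, 4, 2], true)

def Spec_greedy_balance (machine_num : Int) (t_list : List Int) (sort : Bool) (out : Int × List (List Int) × List Int) : Prop := out = greedy_balance_alt machine_num t_list sort
instance (machine_num : Int) (t_list : List Int) (sort : Bool) (out : Int × List (List Int) × List Int) : Decidable (Spec_greedy_balance machine_num t_list sort out) := by unfold Spec_greedy_balance; infer_instance

-- ===== CLAIM (what is proved, stated in full; the proofs are below) =====
def Claim_equal_greedy_balance : Prop := ∀ (machine_num : Int) (t_list : List Int) (sort : Bool), Dom_greedy_balance machine_num t_list sort → Pre_greedy_balance machine_num t_list sort → Spec_greedy_balance machine_num t_list sort (greedy_balance machine_num t_list sort)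

-- ===== LEMMAS AND PROOFS =====

-- the multiset of a heap's entries
def SkewHeap.elems : SkewHeap → Multiset (Int × Int)
  | .nil => 0
  | .node v l r => v ::ₘ (l.elems + r.elems)

-- the ≤ order merge uses, as a Prop
def LeP (a b : Int × Int) : Prop := a.1 < b.1 ∨ (a.1 = b.1 ∧ a.2 ≤ b.2)

lemma LeP_refl (a : Int × Int) : LeP a a := Or.inr ⟨rfl, le_refl _⟩
lemma LeP_trans {a b c : Int × Int} (h1 : LeP a b) (h2 : LeP b c) : LeP a c := by
  rcases h1 with h1 | ⟨h1, h1'⟩ <;> rcases h2 with h2 | ⟨h2, h2'⟩ <;>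
    simp only [LeP] <;> omega
lemma pairLe_true {a b : Int × Int} (h : pairLe a b = true) : LeP a b := by
  simpa [pairLe, LeP] using of_decide_eq_true h
lemma pairLe_false {a b : Int × Int} (h : ¬ pairLe a b = true) : LeP b a := by
  have := of_decide_eq_false (Bool.not_eq_true _ |>.mp h)
  simp only [LeP] at *; omega

-- the heap-order invariant
def IsHeap : SkewHeap → Prop
  | .nil => True
  | .node v l r => (∀ x ∈ l.elems, LeP v x) ∧ (∀ x ∈ r.elems, LeP v x) ∧ IsHeap l ∧ IsHeap r

lemma isHeap_root_le {v : Int × Int} {l r : SkewHeap} (h : IsHeap (.node v l r)) :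
    ∀ x ∈ (SkewHeap.node v l r).elems, LeP v x := by
  simp only [IsHeap] at h
  intro x hx
  simp only [SkewHeap.elems, Multiset.mem_cons, Multiset.mem_add] at hx
  rcases hx with rfl | hx | hx
  · exact LeP_refl _
  · exact h.1 x hx
  · exact h.2.1 x hx

lemma elems_mergeFuel : ∀ (fuel : Nat) (h1 h2 : SkewHeap), h1.size + h2.size ≤ fuel →
    (SkewHeap.mergeFuel fuel h1 h2).elems = h1.elems + h2.elems := by
  intro fuel
  induction fuel with
  | zero =>
    intro h1 h2 hf
    cases h1 with
    | nil => simp [SkewHeap.mergeFuel, SkewHeap.elems]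
    | node v1 l1 r1 =>
      cases h2 with
      | nil => simp [SkewHeap.mergeFuel, SkewHeap.elems]
      | node v2 l2 r2 => simp [SkewHeap.size] at hf
  | succ n ih =>
    intro h1 h2 hf
    cases h1 with
    | nil => simp [SkewHeap.mergeFuel, SkewHeap.elems]
    | node v1 l1 r1 =>
      cases h2 with
      | nil => simp [SkewHeap.mergeFuel, SkewHeap.elems]
      | node v2 l2 r2 =>
        simp only [SkewHeap.size] at hf
        simp only [SkewHeap.mergeFuel]
        split_ifs
        · ext a
          simp only [SkewHeap.elems,
            ih (.node v2 l2 r2) r1 (by simp only [SkewHeap.size]; omega),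
            Multiset.count_cons, Multiset.count_add]
          split_ifs <;> omega
        · ext a
          simp only [SkewHeap.elems,
            ih (.node v1 l1 r1) r2 (by simp only [SkewHeap.size]; omega),
            Multiset.count_cons, Multiset.count_add]
          split_ifs <;> omega

lemma elems_merge (h1 h2 : SkewHeap) : (h1.merge h2).elems = h1.elems + h2.elems :=
  elems_mergeFuel _ h1 h2 le_rfl

lemma isHeap_mergeFuel : ∀ (fuel : Nat) (h1 h2 : SkewHeap), h1.size + h2.size ≤ fuel →
    IsHeap h1 → IsHeap h2 → IsHeap (SkewHeap.mergeFuel fuel h1 h2) := by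
  intro fuel
  induction fuel with
  | zero =>
    intro h1 h2 hf H1 H2
    cases h1 with
    | nil => simpa [SkewHeap.mergeFuel] using H2
    | node v1 l1 r1 =>
      cases h2 with
      | nil => simpa [SkewHeap.mergeFuel] using H1
      | node v2 l2 r2 => simp [SkewHeap.size] at hf
  | succ n ih =>
    intro h1 h2 hf H1 H2
    cases h1 with
    | nil => simpa [SkewHeap.mergeFuel] using H2
    | node v1 l1 r1 =>
      cases h2 with
      | nil => simpa [SkewHeap.mergeFuel] using H1
      | node v2 l2 r2 =>
        simp only [SkewHeap.size] at hf
        simp only [SkewHeap.mergeFuel]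
        simp only [IsHeap] at H1 H2
        have hf1 : (SkewHeap.node v2 l2 r2).size + r1.size ≤ n := by
          simp only [SkewHeap.size]; omega
        have hf2 : (SkewHeap.node v1 l1 r1).size + r2.size ≤ n := by
          simp only [SkewHeap.size]; omega
        split_ifs with hle
        · simp only [IsHeap]
          refine ⟨?_, H1.1, ih _ _ hf1 ⟨H2.1, H2.2.1, H2.2.2.1, H2.2.2.2⟩ H1.2.2.2, H1.2.2.1⟩
          intro x hx
          rw [elems_mergeFuel _ _ _ hf1, Multiset.mem_add] at hx
          rcases hx with hx | hx
          · exact LeP_trans (pairLe_true hle) (isHeap_root_le ⟨H2.1, H2.2.1, H2.2.2.1, H2.2.2.2⟩ x hx)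
          · exact H1.2.1 x hx
        · simp only [IsHeap]
          refine ⟨?_, H2.1, ih _ _ hf2 H1 H2.2.2.2, H2.2.2.1⟩
          intro x hx
          rw [elems_mergeFuel _ _ _ hf2, Multiset.mem_add] at hx
          rcases hx with hx | hx
          · exact LeP_trans (pairLe_false hle) (isHeap_root_le ⟨H1.1, H1.2.1, H1.2.2.1, H1.2.2.2⟩ x hx)
          · exact H2.2.1 x hx

lemma isHeap_merge {h1 h2 : SkewHeap} (H1 : IsHeap h1) (H2 : IsHeap h2) : IsHeap (h1.merge h2) :=
  isHeap_mergeFuel _ h1 h2 le_rfl H1 H2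

-- the multiset {(accs[i], i) : i} shifted by k
def pairsFrom : List Int → Int → Multiset (Int × Int)
  | [], _ => 0
  | a :: t, k => (a, k) ::ₘ pairsFrom t (k + 1)

lemma mem_pairsFrom {x : Int × Int} : ∀ (accs : List Int) (k : Int),
    x ∈ pairsFrom accs k ↔ ∃ n : Nat, ∃ _ : n < accs.length, x = (accs[n], k + n) := by
  intro accs
  induction accs with
  | nil => intro k; simp [pairsFrom]
  | cons a t ih =>
    intro k
    simp only [pairsFrom, Multiset.mem_cons, ih (k + 1)]
    constructor
    · rintro (rfl | ⟨n, hn, rfl⟩)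
      · exact ⟨0, by simp, by simp⟩
      · refine ⟨n + 1, by simpa using hn, ?_⟩
        simp only [List.getElem_cons_succ]
        congr 1
        push_cast
        omega
    · rintro ⟨n, hn, rfl⟩
      match n with
      | 0 => left; simp
      | Nat.succ n =>
        right
        refine ⟨n, by simpa using hn, ?_⟩
        simp only [List.getElem_cons_succ]
        congr 1
        push_cast
        omega

lemma pairsFrom_set : ∀ (accs : List Int) (n : Nat) (hn : n < accs.length) (v : Int) (k : Int),
    (accs[n], k + n) ::ₘ pairsFrom (accs.set n v) k = (v, k + n) ::ₘ pairsFrom accs k := by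
  intro accs
  induction accs with
  | nil => intro n hn; simp at hn
  | cons a t ih =>
    intro n hn v k
    match n with
    | 0 =>
      simp only [List.getElem_cons_zero, List.set_cons_zero, pairsFrom]
      push_cast
      rw [Multiset.cons_swap]
      simp
    | Nat.succ n =>
      have hn' : n < t.length := by simpa using hn
      simp only [List.getElem_cons_succ, List.set_cons_succ, pairsFrom]
      have harith : k + (((n : Int)) + 1) = (k + 1) + (n : Int) := by ring
      push_cast
      rw [harith, Multiset.cons_swap (t[n], k + 1 + (n : Int)) (a, k),
        Multiset.cons_swap (v, k + 1 + (n : Int)) (a, k)]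
      congr 1
      exact ih n hn' v (k + 1)

-- the heap root is exactly A's (min(accumulators), accumulators.index(min))
lemma root_characterization {v : Int × Int} {l r : SkewHeap} {accs : List Int}
    (hh : IsHeap (.node v l r)) (he : (SkewHeap.node v l r).elems = pairsFrom accs 0) :
    ∃ m : Int, ∃ j : Nat, PySem.List.min? accs (fun x => x) = some m ∧
      PySem.List.index? accs m = some j ∧ v = (m, (j : Int)) := by
  have hv : v ∈ pairsFrom accs 0 := by
    rw [← he]; simp [SkewHeap.elems]
  rw [mem_pairsFrom] at hv
  obtain ⟨n, hn, rfl⟩ := hv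
  have hne : accs ≠ [] := by intro hc; subst hc; simp at hn
  obtain ⟨m, hm⟩ : ∃ m, PySem.List.min? accs (fun x => x) = some m := by
    cases hmi : PySem.List.min? accs (fun x => x) with
    | none => exact absurd ((PySem.List.min?_eq_none_iff _ _).mp hmi) hne
    | some m => exact ⟨m, rfl⟩
  have hmmem : m ∈ accs := PySem.List.min?_mem hm
  have hmin : ∀ y ∈ accs, m ≤ y := PySem.List.min?_isMin hm
  have hroot := isHeap_root_le hh
  rw [he] at hroot
  have h1 : m ≤ accs[n] := hmin _ (accs.getElem_mem hn)
  have h2 : accs[n] ≤ m := by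
    obtain ⟨p, hp, rfl⟩ := List.mem_iff_getElem.mp hmmem
    have hlp := hroot (accs[p], 0 + (p : Int)) (mem_pairsFrom accs 0 |>.mpr ⟨p, hp, rfl⟩)
    rcases hlp with hlt | ⟨heq, _⟩
    · exact le_of_lt hlt
    · exact le_of_eq heq
  have heqm : accs[n] = m := le_antisymm h2 h1
  obtain ⟨j, hj⟩ : ∃ j, PySem.List.index? accs m = some j := by
    cases hji : PySem.List.index? accs m with
    | none => exact absurd ((PySem.List.index?_eq_none_iff _ _).mp hji) (by simpa using hmmem)
    | some j => exact ⟨j, rfl⟩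
  obtain ⟨hjlt, hjv, hjmin⟩ := PySem.List.getElem_of_index?_eq_some hj
  have hle := hroot (accs[j], 0 + (j : Int)) (mem_pairsFrom accs 0 |>.mpr ⟨j, hjlt, rfl⟩)
  have hnj : n ≤ j := by
    rcases hle with hlt | ⟨_, hle2⟩
    · exact absurd hlt (by rw [heqm, hjv]; exact lt_irrefl m)
    · have h2' := hle2
      simp at h2'
      omega
  have hjn : j ≤ n := by
    by_contra hc
    exact hjmin n (by omega) heqm
  have hnjeq : n = j := le_antisymm hnj hjn
  subst hnjeq
  exact ⟨m, n, hm, hj, by rw [heqm]; simp⟩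

-- the relation preserved along the two job loops
def StRel (stA : List (List Int) × List Int) (stB : SkewHeap × List (List Int) × List Int) : Prop :=
  stA.1 = stB.2.1 ∧ stA.2 = stB.2.2 ∧ IsHeap stB.1 ∧ stB.1.elems = pairsFrom stA.2 0 ∧ stA.2 ≠ []

lemma step_rel {stA : List (List Int) × List Int} {stB : SkewHeap × List (List Int) × List Int} (h : StRel stA stB) (t : Int) : StRel (greedyStepA stA t) (greedyStepB stB t) := by
  obtain ⟨asg, accs⟩ := stA
  obtain ⟨hp, asg2, accs2⟩ := stB
  obtain ⟨hA, hL, hH, hE, hne⟩ := h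
  simp only at hA hL hE hne
  subst hA; subst hL
  cases hp with
  | nil =>
    exfalso
    cases accs with
    | nil => exact hne rfl
    | cons a tl => simp [SkewHeap.elems, pairsFrom] at hE
  | node v l r =>
    obtain ⟨m, j, hm, hj, rfl⟩ := root_characterization hH hE
    obtain ⟨hjlt, hjv, _⟩ := PySem.List.getElem_of_index?_eq_some hj
    simp only [IsHeap] at hH
    simp only [greedyStepA, greedyStepB, hm, hj, Option.getD_some,
      PySem.List.pySetD_natCast, PySem.List.pyGetD_natCast]
    refine ⟨rfl, rfl, ?_, ?_, ?_⟩
    · exact isHeap_merge (isHeap_merge hH.2.2.1 hH.2.2.2) (by simp [IsHeap, SkewHeap.elems])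
    · -- elems of the new heap = pairs of the updated accumulators
      have hgd : accs.getD j 0 = m := by
        rw [accs.getD_eq_getElem 0 hjlt, hjv]
      rw [hgd]
      have hcons : (m, (j : Int)) ::ₘ (SkewHeap.merge (SkewHeap.merge l r)
            (.node (m + t, (j : Int)) .nil .nil)).elems
          = (m, (j : Int)) ::ₘ pairsFrom (accs.set j (m + t)) 0 := by
        rw [elems_merge, elems_merge]
        have hset := pairsFrom_set accs j hjlt (m + t) 0
        rw [hjv] at hset
        simp only [zero_add] at hset
        rw [hset]
        have holdE : (m, (j : Int)) ::ₘ (l.elems + r.elems) = pairsFrom accs 0 := by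
          simpa [SkewHeap.elems] using hE
        rw [← holdE]
        ext x
        simp only [SkewHeap.elems, Multiset.count_cons, Multiset.count_add, Multiset.count_zero]
        split_ifs <;> omega
      exact (Multiset.cons_inj_right _).mp hcons
    · simp only [ne_eq, ← List.length_eq_zero_iff, List.length_set] at hne ⊢
      exact hne

lemma fold_rel : ∀ (ts : List Int) stA stB, StRel stA stB →
    StRel (ts.foldl greedyStepA stA) (ts.foldl greedyStepB stB) := by
  intro ts
  induction ts with
  | nil => intro _ _ h; exact h
  | cons t ts ih => intro stA stB h; exact ih _ _ (step_rel h t)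

lemma buildHeap_spec : ∀ (fuel : Nat) (lo hi : Int), (hi - lo).toNat ≤ fuel →
    IsHeap (buildHeap fuel lo hi) ∧
    (buildHeap fuel lo hi).elems
      = (((PySem.List.pyRange lo hi 1).map fun i => ((0 : Int), i) : List (Int × Int)) : Multiset (Int × Int)) := by
  intro fuel
  induction fuel with
  | zero =>
    intro lo hi hf
    have hle : hi ≤ lo := by omega
    simp [buildHeap, IsHeap, SkewHeap.elems, PySem.List.pyRange_one_eq_nil hle]
  | succ n ih =>
    intro lo hi hf
    by_cases hle : hi ≤ lo
    · simp [buildHeap, hle, IsHeap, SkewHeap.elems, PySem.List.pyRange_one_eq_nil hle]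
    · have hlt : lo < hi := by omega
      obtain ⟨hm1, hm2⟩ := PySem.Int.floordiv_two_mid_bounds (lo := lo + 1) (hi := hi) (by omega)
      have ih1 := ih (lo + 1) (PySem.Int.floordiv (lo + 1 + hi) 2) (by omega)
      have ih2 := ih (PySem.Int.floordiv (lo + 1 + hi) 2) hi (by omega)
      have helems : (buildHeap (n + 1) lo hi).elems
          = (((PySem.List.pyRange lo hi 1).map fun i => ((0 : Int), i) : List (Int × Int)) : Multiset (Int × Int)) := by
        simp only [buildHeap, if_neg hle, SkewHeap.elems, ih1.2, ih2.2]
        rw [PySem.List.pyRange_one_cons hlt,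
          PySem.List.pyRange_one_append (lo + 1) (PySem.Int.floordiv (lo + 1 + hi) 2) hi hm1 hm2]
        simp
      refine ⟨?_, helems⟩
      simp only [buildHeap, if_neg hle, IsHeap]
      refine ⟨?_, ?_, ih1.1, ih2.1⟩
      · intro x hx
        rw [ih1.2] at hx
        simp only [Multiset.mem_coe, List.mem_map] at hx
        obtain ⟨i, hi', rfl⟩ := hx
        rw [PySem.List.mem_pyRange_one] at hi'
        exact Or.inr ⟨rfl, by omega⟩
      · intro x hx
        rw [ih2.2] at hx
        simp only [Multiset.mem_coe, List.mem_map] at hx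
        obtain ⟨i, hi', rfl⟩ := hx
        rw [PySem.List.mem_pyRange_one] at hi'
        exact Or.inr ⟨rfl, by omega⟩

lemma pairsFrom_append_singleton : ∀ (xs : List Int) (a : Int) (k : Int),
    pairsFrom (xs ++ [a]) k = pairsFrom xs k + {(a, k + xs.length)} := by
  intro xs
  induction xs with
  | nil => intro a k; simp [pairsFrom]
  | cons x tl ih =>
    intro a k
    simp only [List.cons_append, pairsFrom, ih, Multiset.cons_add, List.length_cons]
    congr 2
    push_cast
    ring

lemma pairsFrom_replicate : ∀ n : Nat,
    pairsFrom (List.replicate n 0) 0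
      = (((PySem.List.pyRange 0 (n : Int) 1).map fun i => ((0 : Int), i) : List (Int × Int)) : Multiset (Int × Int)) := by
  intro n
  induction n with
  | zero => simp [pairsFrom, PySem.List.pyRange_one_eq_nil le_rfl]
  | succ n ih =>
    have hcast : ((n + 1 : Nat) : Int) = (n : Int) + 1 := by push_cast; ring
    rw [hcast, PySem.List.pyRange_one_succ_right (by positivity), List.replicate_succ',
      pairsFrom_append_singleton]
    simp only [List.map_append, List.map_cons, List.map_nil, ih, List.length_replicate]
    rw [show ((0:Int), 0 + (n:Int)) = ((0:Int), (n:Int)) by simp, ← Multiset.coe_singleton, ← Multiset.coe_add]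

-- the initial heap holds (0, i) for i in range(machine_num)
lemma init_heap (machine_num : Int) (hm : 1 ≤ machine_num) :
    IsHeap (buildHeap machine_num.toNat 0 machine_num) ∧
    (buildHeap machine_num.toNat 0 machine_num).elems
      = pairsFrom (List.replicate machine_num.toNat 0) 0 := by
  have hb := buildHeap_spec machine_num.toNat 0 machine_num (by omega)
  refine ⟨hb.1, ?_⟩
  rw [hb.2, pairsFrom_replicate]
  have : machine_num = ((machine_num.toNat : Int)) := by omega
  rw [← this]

-- ===== VERDICT (by name: the statement is the Claim_ definition above) =====
theorem greedy_balance_spec : Claim_equal_greedy_balance := by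
  intro machine_num t_list sort _ hpre
  have hm : 1 ≤ machine_num := hpre
  simp only [Spec_greedy_balance, greedy_balance, greedy_balance_alt]
  rw [PySem.List.foldl_pyRange_zero_pyGetD]
  have hinit := init_heap machine_num hm
  have hne : List.replicate machine_num.toNat 0 ≠ ([] : List Int) := by
    simp only [ne_eq, List.replicate_eq_nil_iff]
    omega
  have hrel := fold_rel (if sort then PySem.List.sorted t_list (fun x => x) true else t_list)
      ((PySem.List.pyRange 0 machine_num 1).map (fun _ => ([] : List Int)),
        List.replicate machine_num.toNat 0)
      (buildHeap machine_num.toNat 0 machine_num,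
        (PySem.List.pyRange 0 machine_num 1).map (fun _ => ([] : List Int)),
        List.replicate machine_num.toNat 0)
      ⟨rfl, rfl, hinit.1, hinit.2, hne⟩
  obtain ⟨h1, h2, -, -, -⟩ := hrel
  rw [h1, h2]
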